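-- pv_equiv track=rewrite | github.com/gustavos86/algorithms | dynamic_programming.py | add_until_100
-- ===== SOURCE A (Python) =====
-- def add_until_100(array):
--     """
--     The following function accepts an array of numbers and returns the sum,
--     as long as a particular number doesn't bring the sum above 100.
--     If adding a particular number will make the sum higher than 100,
--     that number is ignored. However, this function makes unnecessary recursive calls.
--     Fix the code to eliminate the unnecessary recursion:
--     """
--     if len(array) == 0:
--         return 0
--
--     sumOfRemainingNumbers = add_until_100(array[1:])
--
--     if array[0] + sumOfRemainingNumbers > 100:
--         return sumOfRemainingNumbers
--     else:
--         return array[0] + sumOfRemainingNumbers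
-- ===== SOURCE B (Python) =====
-- def add_until_100(array):
--     total = 0
--     for x in reversed(array):
--         if total + x <= 100:
--             total += x
--     return total
-- ===== Notes on version B (the rewrite author's own statement) =====
-- stated objective: faster
-- what changed: Replaces the recursion that slices a fresh copy of the tail at every level with a single iterative back-to-front loop keeping a running sum.
import Mathlib
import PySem

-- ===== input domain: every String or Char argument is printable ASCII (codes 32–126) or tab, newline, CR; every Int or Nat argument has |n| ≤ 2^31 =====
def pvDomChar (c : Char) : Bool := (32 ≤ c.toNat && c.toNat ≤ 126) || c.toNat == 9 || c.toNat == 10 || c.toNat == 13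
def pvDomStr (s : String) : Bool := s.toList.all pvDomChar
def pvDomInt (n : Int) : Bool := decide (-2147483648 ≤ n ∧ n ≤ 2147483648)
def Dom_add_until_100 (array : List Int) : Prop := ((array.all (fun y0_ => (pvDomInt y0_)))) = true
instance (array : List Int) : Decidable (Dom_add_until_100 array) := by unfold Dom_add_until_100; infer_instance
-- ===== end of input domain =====

-- B replaces A's tail-slicing recursion with one iterative back-to-front pass keeping a running sum (faster: no per-level list copies).

-- ===== PORT A =====
def add_until_100 (array : List Int) : Int :=
  match array with
  | [] => 0
  | x :: rest =>
    let sumOfRemainingNumbers := add_until_100 rest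
    if x + sumOfRemainingNumbers > 100 then sumOfRemainingNumbers
    else x + sumOfRemainingNumbers

-- ===== PORT B =====
-- loop 'for x in reversed(array): if total + x <= 100: total += x'
def add_until_100_alt (array : List Int) : Int :=
  array.reverse.foldl (fun total x => if total + x ≤ 100 then total + x else total) 0

-- ===== PRECONDITION & SPEC =====
def Spec_add_until_100 (array : List Int) (out : Int) : Prop := out = add_until_100_alt array
instance (array : List Int) (out : Int) : Decidable (Spec_add_until_100 array out) := by unfold Spec_add_until_100; infer_instance

-- ===== CLAIM (what is proved, stated in full; the proofs are below) =====
def Claim_equal_add_until_100 : Prop := ∀ (array : List Int), Dom_add_until_100 array → Spec_add_until_100 array (add_until_100 array)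

-- ===== LEMMAS AND PROOFS =====
theorem add_until_100_eq_alt (array : List Int) : add_until_100 array = add_until_100_alt array := by
  induction array with
  | nil => rfl
  | cons x rest ih =>
    rw [add_until_100]
    unfold add_until_100_alt
    rw [List.reverse_cons, List.foldl_append, List.foldl_cons, List.foldl_nil]
    rw [show add_until_100 rest = add_until_100_alt rest from ih]
    unfold add_until_100_alt
    split_ifs with h1 h2 h2 <;> omega

-- ===== VERDICT (by name: the statement is the Claim_ definition above) =====
theorem add_until_100_spec : Claim_equal_add_until_100 := by
  intro array _
  exact add_until_100_eq_alt array
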